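-- pv_equiv track=rewrite | github.com/nuniesmith/ruby | src/lib/services/data/api/grok.py | _format_sse
-- ===== SOURCE A (Python) =====
-- def _format_sse(data: str, event: str | None = None) -> str:
--     """Format a single SSE message."""
--     lines = []
--     if event:
--         lines.append(f"event: {event}")
--     for line in data.split("\n"):
--         lines.append(f"data: {line}")
--     lines.append("")
--     lines.append("")
--     return "\n".join(lines)
-- ===== SOURCE B (Python) =====
-- def _format_sse(data: str, event: str | None = None) -> str:
--     """Format a single SSE message."""
--     body = "data: " + data.replace("\n", "\ndata: ")
--     head = f"event: {event}\n" if event else ""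
--     return head + body + "\n\n"
-- ===== Notes on version B (the rewrite author's own statement) =====
-- stated objective: idiomatic
-- what changed: Replaces the split/per-line-loop/join pipeline with a single str.replace that prefixes every line, plus direct concatenation of the optional event header and the blank-line terminator; no intermediate line list is built.
import Mathlib
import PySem

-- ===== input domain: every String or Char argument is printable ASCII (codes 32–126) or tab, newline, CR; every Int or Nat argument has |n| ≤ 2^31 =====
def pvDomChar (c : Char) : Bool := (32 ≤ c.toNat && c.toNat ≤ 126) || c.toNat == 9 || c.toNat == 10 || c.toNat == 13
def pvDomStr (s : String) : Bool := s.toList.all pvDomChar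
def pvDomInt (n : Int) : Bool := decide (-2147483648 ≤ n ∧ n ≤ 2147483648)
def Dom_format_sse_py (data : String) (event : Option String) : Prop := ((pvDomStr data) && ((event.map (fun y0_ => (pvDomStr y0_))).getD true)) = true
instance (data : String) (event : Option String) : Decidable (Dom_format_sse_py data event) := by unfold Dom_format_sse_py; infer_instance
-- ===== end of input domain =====

-- B formats the SSE message idiomatically: one str.replace prefixes every line, and the optional
-- event header and the blank-line terminator are concatenated directly (no intermediate line list).


-- ===== PORT A =====
def format_sse_py (data : String) (event : Option String) : String :=
  let lines : List (List Char) := []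
  let lines : List (List Char) :=
    match event with
    | some e => if e.toList ≠ [] then lines ++ ["event: ".toList ++ e.toList] else lines
    | none => lines
  let lines := (PySem.Chars.splitOn data.toList "\n".toList).foldl
    (fun acc line => acc ++ ["data: ".toList ++ line]) lines
  let lines := lines ++ [[]]
  let lines := lines ++ [[]]
  String.mk (PySem.Chars.join "\n".toList lines)

-- ===== PORT B =====
def format_sse_py_alt (data : String) (event : Option String) : String :=
  let body := "data: ".toList ++ PySem.Chars.replace data.toList "\n".toList "\ndata: ".toList
  let head : List Char :=
    match event with
    | some e => if e.toList ≠ [] then "event: ".toList ++ e.toList ++ "\n".toList else []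
    | none => []
  String.mk (head ++ body ++ "\n\n".toList)

-- ===== PRECONDITION & SPEC =====
def Spec_format_sse_py (data : String) (event : Option String) (out : String) : Prop := out = format_sse_py_alt data event
instance (data : String) (event : Option String) (out : String) : Decidable (Spec_format_sse_py data event out) := by unfold Spec_format_sse_py; infer_instance

-- ===== CLAIM (what is proved, stated in full; the proofs are below) =====
def Claim_equal_format_sse_py : Prop := ∀ (data : String) (event : Option String), Dom_format_sse_py data event → Spec_format_sse_py data event (format_sse_py data event)

-- ===== LEMMAS AND PROOFS =====

-- the "data: "-prefix payload: every '\n' becomes "\ndata: "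
def pvF (l : List Char) : List Char :=
  l.flatMap (fun c => if c = '\n' then '\n' :: "data: ".toList else [c])

-- clean recursion computing splitOn.go's segments
def pvSplitNl (pre : List Char) : List Char → List (List Char)
  | [] => [pre]
  | c :: t => if c = '\n' then pre :: pvSplitNl [] t else pvSplitNl (pre ++ [c]) t

theorem pvSplitNl_ne_nil (pre l : List Char) : pvSplitNl pre l ≠ [] := by
  induction l generalizing pre with
  | nil => simp [pvSplitNl]
  | cons c t ih => simp only [pvSplitNl]; split_ifs <;> simp [ih]

theorem splitOn_go_eq (fuel : Nat) (l cur : List Char) (acc : List (List Char))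
    (h : l.length ≤ fuel) :
    PySem.Chars.splitOn.go "\n".toList fuel l cur acc = acc.reverse ++ pvSplitNl cur.reverse l := by
  induction fuel generalizing l cur acc with
  | zero =>
    have : l = [] := by cases l <;> simp_all
    subst this
    simp [PySem.Chars.splitOn.go, pvSplitNl]
  | succ n ih =>
    cases l with
    | nil => simp [PySem.Chars.splitOn.go, pvSplitNl]
    | cons c t =>
      simp only [PySem.Chars.splitOn.go]
      by_cases hc : c = '\n'
      · subst hc
        have hp : List.isPrefixOf "\n".toList ('\n' :: t) = true := by simp [List.isPrefixOf]
        rw [if_pos hp]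
        have hdrop : List.drop ("\n".toList).length ('\n' :: t) = t := by simp
        rw [hdrop, ih _ _ _ (by simp at h; omega)]
        simp [pvSplitNl]
      · have hp : List.isPrefixOf "\n".toList (c :: t) = false := by
          simp [List.isPrefixOf]
          exact Ne.symm hc
        rw [if_neg (by simp [List.isPrefixOf]; exact Ne.symm hc)]
        rw [ih _ _ _ (by simp at h; omega)]
        simp [pvSplitNl, hc]

theorem replace_go_eq (fuel : Nat) (l acc : List Char) (h : l.length ≤ fuel) :
    PySem.Chars.replace.go "\n".toList "\ndata: ".toList fuel l acc = acc.reverse ++ pvF l := by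
  induction fuel generalizing l acc with
  | zero =>
    have : l = [] := by cases l <;> simp_all
    subst this
    simp [PySem.Chars.replace.go, pvF]
  | succ n ih =>
    cases l with
    | nil => simp [PySem.Chars.replace.go, pvF]
    | cons c t =>
      simp only [PySem.Chars.replace.go]
      by_cases hc : c = '\n'
      · subst hc
        have hp : List.isPrefixOf "\n".toList ('\n' :: t) = true := by simp [List.isPrefixOf]
        rw [if_pos hp]
        have hdrop : List.drop ("\n".toList).length ('\n' :: t) = t := by simp
        rw [hdrop, ih _ _ (by simp at h; omega)]
        simp [pvF]
      · have hp : List.isPrefixOf "\n".toList (c :: t) = false := by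
          simp [List.isPrefixOf]
          exact Ne.symm hc
        rw [if_neg (by simp [List.isPrefixOf]; exact Ne.symm hc)]
        rw [ih _ _ (by simp at h; omega)]
        simp [pvF, hc]

theorem join_append (sep : List Char) (xs ys : List (List Char)) (hx : xs ≠ []) (hy : ys ≠ []) :
    PySem.Chars.join sep (xs ++ ys) = PySem.Chars.join sep xs ++ sep ++ PySem.Chars.join sep ys := by
  induction xs with
  | nil => exact absurd rfl hx
  | cons x xt ih =>
    cases xt with
    | nil =>
      cases ys with
      | nil => exact absurd rfl hy
      | cons y yt => simp [PySem.Chars.join_cons_cons, PySem.Chars.join_singleton]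
    | cons x' xt' =>
      have h1 : (x :: x' :: xt') ++ ys = x :: x' :: (xt' ++ ys) := by simp
      rw [h1, PySem.Chars.join_cons_cons]
      have h2 : x' :: (xt' ++ ys) = (x' :: xt') ++ ys := rfl
      rw [h2, ih (by simp), PySem.Chars.join_cons_cons]
      simp

theorem join_map_pvSplitNl (pre l : List Char) :
    PySem.Chars.join "\n".toList ((pvSplitNl pre l).map (fun s => "data: ".toList ++ s)) =
      "data: ".toList ++ pre ++ pvF l := by
  induction l generalizing pre with
  | nil => simp [pvSplitNl, PySem.Chars.join_singleton, pvF]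
  | cons c t ih =>
    by_cases hc : c = '\n'
    · subst hc
      have hstep : pvSplitNl pre ('\n' :: t) = pre :: pvSplitNl [] t := by simp [pvSplitNl]
      obtain ⟨a, b, hxs⟩ : ∃ a b, pvSplitNl ([] : List Char) t = a :: b := by
        cases h' : pvSplitNl ([] : List Char) t with
        | nil => exact absurd h' (pvSplitNl_ne_nil _ _)
        | cons a b => exact ⟨a, b, rfl⟩
      rw [hstep, List.map_cons, hxs, List.map_cons, PySem.Chars.join_cons_cons,
        ← List.map_cons, ← hxs, ih]
      simp [pvF]
    · have hstep : pvSplitNl pre (c :: t) = pvSplitNl (pre ++ [c]) t := by simp [pvSplitNl, hc]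
      rw [hstep, ih]
      simp [pvF, hc]

theorem join_cons_of_ne_nil (sep a : List Char) (xs : List (List Char)) (hx : xs ≠ []) :
    PySem.Chars.join sep (a :: xs) = a ++ sep ++ PySem.Chars.join sep xs := by
  have h : a :: xs = [a] ++ xs := rfl
  rw [h, join_append _ _ _ (by simp) hx, PySem.Chars.join_singleton]

theorem format_sse_eq (data : String) (event : Option String) :
    format_sse_py data event = format_sse_py_alt data event := by
  unfold format_sse_py format_sse_py_alt
  simp only [PySem.List.foldl_append_singleton_eq_map]
  have hsplit : PySem.Chars.splitOn data.toList "\n".toList = pvSplitNl [] data.toList := by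
    unfold PySem.Chars.splitOn
    rw [splitOn_go_eq _ _ _ _ (by omega)]
    simp
  have hrep : PySem.Chars.replace data.toList "\n".toList "\ndata: ".toList = pvF data.toList := by
    unfold PySem.Chars.replace
    rw [if_neg (by simp), replace_go_eq _ _ _ (by omega)]
    simp
  have hmapne : (pvSplitNl ([] : List Char) data.toList).map (fun s => "data: ".toList ++ s) ≠ [] := by
    simp only [ne_eq, List.map_eq_nil_iff]
    exact pvSplitNl_ne_nil _ _
  have hnl : ("\n".toList : List Char) ++ "\n".toList = "\n\n".toList := by decide
  have hbody : PySem.Chars.join "\n".toList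
      ((pvSplitNl ([] : List Char) data.toList).map (fun s => "data: ".toList ++ s) ++ [[], []]) =
      "data: ".toList ++ (pvF data.toList ++ "\n\n".toList) := by
    rw [join_append _ _ [[], []] hmapne (by simp), PySem.Chars.join_cons_cons,
      PySem.Chars.join_singleton, join_map_pvSplitNl]
    simp only [List.append_nil, List.nil_append, List.append_assoc, hnl]
  cases event with
  | none =>
    simp only [hsplit, hrep, List.nil_append, List.append_assoc, List.singleton_append]
    rw [hbody]
  | some e =>
    by_cases he : e.toList = []
    · simp only [hsplit, hrep, he, ne_eq, not_true_eq_false, if_false, List.nil_append,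
        List.append_assoc, List.singleton_append]
      rw [hbody]
    · simp only [hsplit, hrep, ne_eq, he, not_false_eq_true, if_true, List.nil_append,
        List.cons_append, List.append_assoc]
      rw [join_cons_of_ne_nil _ _ _ (by simp), hbody]
      simp [List.append_assoc]

-- ===== VERDICT (by name: the statement is the Claim_ definition above) =====
theorem format_sse_py_spec : Claim_equal_format_sse_py := by
  intro data event _
  unfold Spec_format_sse_py
  exact format_sse_eq data event
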